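-- pv_equiv track=rewrite | github.com/mohankalimuthu/My_Learnings | DSAsolving/GeeksForGeeks/12-01-2026/segregate odd or even.py | segregate_odd_even
-- ===== SOURCE A (Python) =====
-- def segregate_odd_even(arr):
--     odd = []
--     even = []
--     for i in arr:
--         if i%2 == 0:
--             even.append(i)
--         else:
--             odd.append(i)
--     odd.sort()
--     even.sort()
--     arr[:] = even + odd   #arr[:] means in-place modification
--     return arr
-- ===== SOURCE B (Python) =====
-- def segregate_odd_even(arr):
--     # Sort once, then partition the sorted list by parity (each class inherits order).
--     s = sorted(arr)
--     arr[:] = [x for x in s if x % 2 == 0] + [x for x in s if x % 2 != 0]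
--     return arr
-- ===== Notes on version B (the rewrite author's own statement) =====
-- stated objective: alternative
-- what changed: B sorts the whole list once and then partitions the sorted list by parity, instead of A's partition-first-then-sort-each-class; both mutate arr in place via arr[:].
import Mathlib
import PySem

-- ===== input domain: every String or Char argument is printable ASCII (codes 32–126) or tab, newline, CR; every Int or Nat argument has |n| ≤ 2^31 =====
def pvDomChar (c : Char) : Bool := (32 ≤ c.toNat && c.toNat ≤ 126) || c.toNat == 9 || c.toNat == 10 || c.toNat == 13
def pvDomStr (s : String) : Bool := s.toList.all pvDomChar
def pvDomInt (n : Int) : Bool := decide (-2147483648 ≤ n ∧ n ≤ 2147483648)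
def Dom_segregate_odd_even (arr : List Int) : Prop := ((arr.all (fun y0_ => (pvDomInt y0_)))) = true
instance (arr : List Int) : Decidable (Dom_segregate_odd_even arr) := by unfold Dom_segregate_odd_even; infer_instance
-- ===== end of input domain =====

-- B sorts the whole list once, then partitions the sorted list by parity; A partitions first and
-- sorts each class. Both Pythons mutate arr in place (arr[:] = …); the theorem is about the return value.

-- ===== PORT A =====
-- loop: accumulate (odd, even) by appending, in order
def segregate_odd_even (arr : List Int) : List Int :=
  let oe := arr.foldl
    (fun (oe : List Int × List Int) i =>
      if PySem.Int.mod i 2 == 0 then (oe.1, oe.2 ++ [i]) else (oe.1 ++ [i], oe.2))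
    ([], [])
  let odd := PySem.List.sorted oe.1 (fun x => x) false
  let even := PySem.List.sorted oe.2 (fun x => x) false
  even ++ odd

-- ===== PORT B =====
def segregate_odd_even_alt (arr : List Int) : List Int :=
  let s := PySem.List.sorted arr (fun x => x) false
  (s.filter (fun x => PySem.Int.mod x 2 == 0)) ++ (s.filter (fun x => !(PySem.Int.mod x 2 == 0)))

-- ===== PRECONDITION & SPEC =====
def Spec_segregate_odd_even (arr : List Int) (out : List Int) : Prop := out = segregate_odd_even_alt arr
instance (arr : List Int) (out : List Int) : Decidable (Spec_segregate_odd_even arr out) := by unfold Spec_segregate_odd_even; infer_instance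

-- ===== CLAIM (what is proved, stated in full; the proofs are below) =====
def Claim_equal_segregate_odd_even : Prop := ∀ (arr : List Int), Dom_segregate_odd_even arr → Spec_segregate_odd_even arr (segregate_odd_even arr)

-- ===== LEMMAS AND PROOFS =====

-- A's loop computes (filter odd, filter even), stated for an abstract parity test p
theorem seg_foldl_filter (p : Int → Bool) (arr : List Int) (o e : List Int) :
    arr.foldl
      (fun (oe : List Int × List Int) i =>
        if p i then (oe.1, oe.2 ++ [i]) else (oe.1 ++ [i], oe.2))
      (o, e)
    = (o ++ arr.filter (fun x => !p x), e ++ arr.filter p) := by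
  induction arr generalizing o e with
  | nil => simp
  | cons a t ih =>
    by_cases h : p a <;>
      simp [List.foldl_cons, h, ih]

-- sorting a filtered list = filtering the sorted list (over Int: perm + pairwise ≤ pins the result)
theorem sorted_filter_comm (arr : List Int) (p : Int → Bool) :
    PySem.List.sorted (arr.filter p) (fun x => x) false
      = (PySem.List.sorted arr (fun x => x) false).filter p := by
  apply PySem.List.sorted_id_eq_of_perm_of_pairwise
  · exact (PySem.List.sorted_perm arr (fun x => x) false).filter p
  · exact (PySem.List.sorted_pairwise arr (fun x => x)).sublist List.filter_sublist

-- ===== VERDICT (by name: the statement is the Claim_ definition above) =====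
theorem segregate_odd_even_spec : Claim_equal_segregate_odd_even := by
  intro arr _
  show segregate_odd_even arr = segregate_odd_even_alt arr
  simp only [segregate_odd_even, segregate_odd_even_alt,
    seg_foldl_filter (fun i => PySem.Int.mod i 2 == 0), List.nil_append,
    sorted_filter_comm]
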